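-- pv_equiv track=rewrite | github.com/bananapowerchicken/leetcode_algo | 482_license_key_formatting.py | format_license_key
-- ===== SOURCE A (Python) =====
-- def format_license_key(s, k) -> str:
--     new_s = s.replace("-", "").upper() # delete - and make upper case
--     new_len = len(new_s)
--     R = new_len % k
--     Z = new_len // k
--
--     if new_len <= k:
--         return new_s
--
--     res_s = ""
--
--     if R:
--         res_s += new_s[0:R]
--         res_s += "-"
--
--     for i in range(Z):
--         curr_i = R + k*i
--         res_s += new_s[curr_i:curr_i + k]
--         res_s += "-"
--
--     return res_s[:-1]
-- ===== SOURCE B (Python) =====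
-- def format_license_key(s, k) -> str:
--     cleaned = s.replace("-", "").upper()
--     if len(cleaned) <= k:
--         return cleaned
--     rev = cleaned[::-1]
--     chunks = [rev[i:i + k] for i in range(0, len(rev), k)]
--     return "-".join(chunks)[::-1]
-- ===== Notes on version B (the rewrite author's own statement) =====
-- stated objective: idiomatic
-- what changed: B reverses the cleaned string, cuts it into k-sized slices from the front, and joins them with '-' before reversing back, instead of computing the remainder/quotient, assembling groups in an index loop with a trailing dash and trimming it.
-- outside the precondition, e.g. on format_license_key('abc-de', -2): A returns 'ABCD', B returns ''; on format_license_key('ab', 0): A raises ZeroDivisionError, B raises ValueError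
import Mathlib
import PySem

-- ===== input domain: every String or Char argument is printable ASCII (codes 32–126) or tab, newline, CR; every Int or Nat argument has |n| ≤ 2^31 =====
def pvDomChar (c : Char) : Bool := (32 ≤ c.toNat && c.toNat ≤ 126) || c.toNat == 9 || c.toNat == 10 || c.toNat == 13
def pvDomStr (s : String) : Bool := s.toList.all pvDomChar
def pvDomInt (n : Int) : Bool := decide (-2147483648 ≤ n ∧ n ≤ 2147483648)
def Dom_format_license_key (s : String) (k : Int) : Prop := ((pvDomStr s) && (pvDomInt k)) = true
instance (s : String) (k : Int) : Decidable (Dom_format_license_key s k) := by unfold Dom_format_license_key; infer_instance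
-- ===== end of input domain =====

-- B reformats by reversing the cleaned string, slicing it into k-sized chunks and joining with '-'
-- (then reversing back), instead of A's remainder/quotient bookkeeping with a trailing-dash trim;
-- objective: idiomatic. Proved equal for k >= 1 (the natural domain).


-- ===== PORT A =====
def format_license_key (s : String) (k : Int) : String :=
  let new_s := PySem.Chars.upper (PySem.Chars.replace s.toList ['-'] [])
  let new_len : Int := PySem.Chars.len new_s
  let R := PySem.Int.mod new_len k
  let Z := PySem.Int.floordiv new_len k
  if new_len ≤ k then String.mk new_s
  else
    let res0 : List Char := if R ≠ 0 then PySem.List.slice new_s (some 0) (some R) ++ ['-'] else []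
    let res := (PySem.List.pyRange 0 Z).foldl
      (fun acc i => acc ++ PySem.List.slice new_s (some (R + k * i)) (some (R + k * i + k)) ++ ['-']) res0
    String.mk (PySem.List.slice res none (some (-1)))

-- ===== PORT B =====
def format_license_key_alt (s : String) (k : Int) : String :=
  let cleaned := PySem.Chars.upper (PySem.Chars.replace s.toList ['-'] [])
  if PySem.Chars.len cleaned ≤ k then String.mk cleaned
  else
    let rev := cleaned.reverse
    let chunks := (PySem.List.pyRange 0 (PySem.Chars.len rev) k).map
      (fun i => PySem.List.slice rev (some i) (some (i + k)))
    String.mk (PySem.Chars.join ['-'] chunks).reverse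

-- ===== PRECONDITION & SPEC =====
-- Pre_ excludes k ≤ 0, outside the task's natural domain: at k = 0 the Python A raises
-- ZeroDivisionError (and B ValueError), and for negative k A's returned value is an accident
-- of Python's negative floor-division/slicing, not a specified behaviour.
def Pre_format_license_key (s : String) (k : Int) : Prop := 1 ≤ k
instance (s : String) (k : Int) : Decidable (Pre_format_license_key s k) := by unfold Pre_format_license_key; infer_instance
def pvWitness_format_license_key : String × Int := ("abc-de", 2)

def Spec_format_license_key (s : String) (k : Int) (out : String) : Prop := out = format_license_key_alt s k
instance (s : String) (k : Int) (out : String) : Decidable (Spec_format_license_key s k out) := by unfold Spec_format_license_key; infer_instance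

-- ===== CLAIM (what is proved, stated in full; the proofs are below) =====
def Claim_equal_format_license_key : Prop := ∀ (s : String) (k : Int), Dom_format_license_key s k → Pre_format_license_key s k → Spec_format_license_key s k (format_license_key s k)

-- ===== LEMMAS AND PROOFS =====

-- number of chunks B cuts: ceil(n/K) = z + (0 or 1)
lemma pv_ceil_eq (K z r : Nat) (hK : 1 ≤ K) (hr : r < K) :
    (K * z + r + K - 1) / K = z + (if r = 0 then 0 else 1) := by
  rcases Nat.eq_zero_or_pos r with h0 | hpos
  · subst h0
    simp only [Nat.add_zero]
    have : K * z + K - 1 = K * z + (K - 1) := by omega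
    rw [this, Nat.mul_add_div (by omega)]
    simp [Nat.div_eq_of_lt (by omega : K - 1 < K)]
  · simp only [if_neg (by omega : r ≠ 0)]
    have : K * z + r + K - 1 = K * z + (r + K - 1) := by omega
    rw [this, Nat.mul_add_div (by omega)]
    have : (r + K - 1) / K = 1 := by
      apply Nat.div_eq_of_lt_le <;> omega
    omega

-- trailing-dash form vs intercalate
lemma pv_intercalate_cons₂ (x y : List Char) (t : List (List Char)) :
    List.intercalate ['-'] (x :: y :: t) = x ++ '-' :: List.intercalate ['-'] (y :: t) := by
  simp [List.intercalate]

lemma pv_dropLast_flatMap (L : List (List Char)) (h : L ≠ []) :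
    (L.flatMap (fun g => g ++ ['-'])).dropLast = List.intercalate ['-'] L := by
  induction L with
  | nil => exact absurd rfl h
  | cons x t ih =>
    cases t with
    | nil => simp [List.intercalate]
    | cons y t' =>
      have hne : ((y :: t').flatMap (fun g => g ++ ['-'])) ≠ [] := by
        simp [List.flatMap_cons]
      rw [List.flatMap_cons, List.dropLast_append_of_ne_nil hne, ih (by simp),
        pv_intercalate_cons₂]
      simp

lemma pv_intercalate_snoc (L : List (List Char)) (a : List Char) (h : L ≠ []) :
    List.intercalate ['-'] (L ++ [a]) = List.intercalate ['-'] L ++ '-' :: a := by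
  induction L with
  | nil => exact absurd rfl h
  | cons x t ih =>
    cases t with
    | nil => simp [List.intercalate]
    | cons y t' =>
      have e1 : ((x :: y :: t') ++ [a] : List (List Char)) = x :: ((y :: t') ++ [a]) := rfl
      have e2 : ((y :: t') ++ [a] : List (List Char)) = y :: (t' ++ [a]) := rfl
      rw [e1, e2, pv_intercalate_cons₂, ← e2, ih (by simp), pv_intercalate_cons₂]
      simp

lemma pv_reverse_intercalate (L : List (List Char)) :
    (List.intercalate ['-'] L).reverse = List.intercalate ['-'] ((L.map List.reverse).reverse) := by
  induction L with
  | nil => simp [List.intercalate]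
  | cons x t ih =>
    cases t with
    | nil => simp [List.intercalate]
    | cons y t' =>
      rw [pv_intercalate_cons₂]
      have hne : (((y :: t').map List.reverse).reverse) ≠ [] := by simp
      rw [show ((x :: y :: t').map List.reverse).reverse
            = ((y :: t').map List.reverse).reverse ++ [x.reverse] from by simp,
        pv_intercalate_snoc _ _ hne, ← ih]
      simp

lemma pv_groups_eq (c : List Char) (K z r m : Nat) (hK : 1 ≤ K) (hr : r < K)
    (hn : c.length = K * z + r) (hz : 1 ≤ z) (hm : m = z + (if r = 0 then 0 else 1)) :
    ((if r = 0 then [] else [c.take r]) ++ (List.range z).map (fun i => (c.drop (r + K * i)).take K))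
      = (((List.range m).map (fun t => (c.reverse.drop (K * t)).take K)).map List.reverse).reverse := by
  have hchunk : ∀ t : Nat,
      ((c.reverse.drop (K * t)).take K).reverse
        = (c.take (c.length - K * t)).drop (c.length - K * t - K) := by
    intro t
    rw [List.drop_reverse, List.take_reverse, List.reverse_reverse]
    congr 1
    rw [List.length_take]
    omega
  rcases Nat.eq_zero_or_pos r with h0 | hpos
  · subst h0
    have hm' : m = z := by simpa using hm
    simp only [reduceIte, List.nil_append, Nat.zero_add]
    apply List.ext_getElem
    · simp [hm']
    · intro p hp hp'
      simp only [List.length_map, List.length_range] at hp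
      rw [List.getElem_reverse, List.getElem_map]
      simp only [List.length_map, List.length_range]
      rw [List.getElem_map, List.getElem_range, List.getElem_map, List.getElem_range, hchunk]
      set t := m - 1 - p with hT
      have ht : t = z - 1 - p := by omega
      have h1 : K * t + (K * p + K) = K * z := by
        rw [show K * p + K = K * (p + 1) from by ring, ← Nat.mul_add]
        congr 1
        omega
      have h2 : c.length - K * t = K * p + K := by omega
      rw [h2, show K * p + K - K = K * p from by omega, List.drop_take]
      congr 1
      omega
  · have hne : r ≠ 0 := by omega
    have hm' : m = z + 1 := by rw [hm, if_neg hne]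
    rw [if_neg hne, List.singleton_append]
    apply List.ext_getElem
    · simp [hm']
    · intro p hp hp'
      simp only [List.length_cons, List.length_map, List.length_range] at hp
      rw [List.getElem_reverse, List.getElem_map]
      simp only [List.length_map, List.length_range]
      rw [List.getElem_map, List.getElem_range, hchunk]
      set t := m - 1 - p with hT
      cases p with
      | zero =>
        have ht : t = z := by omega
        have h1 : K * t = K * z := by rw [ht]
        have h2 : c.length - K * t = r := by omega
        rw [h2, show r - K = 0 from by omega]
        simp
      | succ i =>
        have hiz : i < z := by omega
        have ht : t = z - 1 - i := by omega
        have h1 : K * t + (K * i + K) = K * z := by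
          rw [show K * i + K = K * (i + 1) from by ring, ← Nat.mul_add]
          congr 1
          omega
        have h2 : c.length - K * t = r + K * i + K := by omega
        rw [h2, show r + K * i + K - K = r + K * i from by omega]
        simp only [List.getElem_cons_succ]
        rw [List.getElem_map, List.getElem_range, List.drop_take]
        congr 1
        omega

-- ===== VERDICT (by name: the statement is the Claim_ definition above) =====
theorem format_license_key_spec : Claim_equal_format_license_key := by
  intro s k _ hk
  unfold Pre_format_license_key at hk
  unfold Spec_format_license_key format_license_key format_license_key_alt
  set c := PySem.Chars.upper (PySem.Chars.replace s.toList ['-'] []) with hc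
  simp only [PySem.Chars.len_eq]
  by_cases hle : (c.length : Int) ≤ k
  · simp [hle]
  · simp only [if_neg hle]
    -- names for the arithmetic pieces
    obtain ⟨K, rfl⟩ : ∃ K : Nat, k = (K : Int) := ⟨k.toNat, by omega⟩
    have hK : 1 ≤ K := by exact_mod_cast hk
    have hKn : K < c.length := by exact_mod_cast not_le.mp hle
    set n := c.length with hnn
    set r := n % K with hrr
    set z := n / K with hzz
    have hr : r < K := Nat.mod_lt _ (by omega)
    have hn : n = K * z + r := by
      rw [hzz, hrr]; exact (Nat.div_add_mod n K).symm
    have hz : 1 ≤ z := (Nat.one_le_div_iff (by omega)).mpr (by omega)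
    -- A side
    rw [PySem.Int.mod_natCast, PySem.Int.floordiv_natCast, PySem.List.pyRange_zero_natCast]
    rw [List.foldl_map]
    have hbody : (fun (acc : List Char) (j : Nat) =>
          acc ++ PySem.List.slice c (some ((r : Int) + (K : Int) * (j : Int)))
            (some ((r : Int) + (K : Int) * (j : Int) + (K : Int))) ++ ['-'])
        = fun acc j => acc ++ ((c.drop (r + K * j)).take K ++ ['-']) := by
      funext acc j
      have h1 : (r : Int) + (K : Int) * (j : Int) = ((r + K * j : Nat) : Int) := by push_cast; ring
      have h2 : (r : Int) + (K : Int) * (j : Int) + (K : Int) = ((r + K * j + K : Nat) : Int) := by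
        push_cast; ring
      rw [h2, h1, PySem.List.slice_natCast,
        show r + K * j + K - (r + K * j) = K from by omega]
      simp [List.append_assoc]
    rw [hbody, PySem.List.foldl_append_eq_flatMap]
    have hres0 : (if (r : Int) ≠ 0 then PySem.List.slice c (some 0) (some (r : Int)) ++ ['-'] else [])
        = (if r = 0 then ([] : List (List Char)) else [c.take r]).flatMap (fun g => g ++ ['-']) := by
      rcases Nat.eq_zero_or_pos r with h0 | hpos
      · simp [h0]
      · have : ((r : Int)) ≠ 0 := by exact_mod_cast (by omega : r ≠ 0)
        rw [if_pos this, if_neg (by omega : ¬ r = 0)]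
        have : (0 : Int) = ((0 : Nat) : Int) := rfl
        rw [this, PySem.List.slice_natCast]
        simp
    rw [hres0,
      show ((List.range z).flatMap (fun j => (c.drop (r + K * j)).take K ++ ['-']))
        = (((List.range z).map (fun j => (c.drop (r + K * j)).take K)).flatMap (fun g => g ++ ['-']))
        from by rw [List.flatMap_map],
      ← List.flatMap_append]
    have hGA_ne : ((if r = 0 then ([] : List (List Char)) else [c.take r])
        ++ (List.range z).map (fun j => (c.drop (r + K * j)).take K)) ≠ [] := by
      intro hcontra
      rw [List.append_eq_nil_iff] at hcontra
      have : z = 0 := by simpa [List.range_eq_nil] using hcontra.2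
      omega
    have hdl : ∀ l : List Char, PySem.List.slice l none (some (-1)) = l.dropLast := by
      intro l; simp [pysem]
    rw [hdl, pv_dropLast_flatMap _ hGA_ne]
    -- B side
    set m := (n + K - 1) / K with hmm
    have hm : m = z + (if r = 0 then 0 else 1) := by
      rw [hmm, show n + K - 1 = K * z + r + K - 1 from by omega, pv_ceil_eq K z r hK hr]
    have hrange : PySem.List.pyRange 0 ((c.reverse.length : Int)) (K : Int)
        = (List.range m).map (fun t => ((K * t : Nat) : Int)) := by
      rw [PySem.List.pyRange_of_pos _ _ (by exact_mod_cast hK : (0:Int) < K)]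
      have hlt : (0 : Int) < (c.reverse.length : Int) := by simp; omega
      rw [if_pos hlt]
      have : ((c.reverse.length : Int) - 0 + (K : Int) - 1) / (K : Int) = ((n + K - 1 : Nat) : Int) / ((K : Nat) : Int) := by
        simp; ring_nf; congr 1; omega
      rw [this, ← Int.natCast_div]
      simp only [Int.toNat_natCast, ← hmm]
      apply List.map_congr_left
      intro t _
      push_cast; ring
    rw [hrange, List.map_map]
    have hchunks : ((fun i => PySem.List.slice c.reverse (some i) (some (i + (K : Int)))) ∘
          fun t => ((K * t : Nat) : Int))
        = fun t => (c.reverse.drop (K * t)).take K := by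
      funext t
      simp only [Function.comp]
      rw [show ((K * t : Nat) : Int) + (K : Int) = ((K * t + K : Nat) : Int) from by push_cast; ring,
        PySem.List.slice_natCast]
      congr 1
      omega
    rw [hchunks]
    have hjoin : ∀ L : List (List Char), PySem.Chars.join ['-'] L = List.intercalate ['-'] L := by
      intro L; simp [PySem.Chars.join, List.intercalate]
    rw [hjoin]
    congr 1
    rw [pv_reverse_intercalate]
    congr 1
    exact pv_groups_eq c K z r m hK hr (by omega) hz hm
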